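-- pv_equiv track=rewrite | github.com/nash981/CSC120 | Short_Project/SP4/proj04-short/wordle_utils.py | missed_check
-- ===== SOURCE A (Python) =====
-- def missed_check(guess_residue,correct_residue,miss_list):
--     letter_dict = {}
--     for i in range(len(guess_residue)):
--         if guess_residue[i] in correct_residue and guess_residue[i] != ".":
--             if guess_residue[i] in letter_dict.keys():
--                 letter_dict[guess_residue[i]] +=1
--             else:
--                 letter_dict[guess_residue[i]]=1
--     for i in range(len(guess_residue)):
--         if guess_residue[i] in correct_residue and guess_residue[i] != ".":
--             if guess_residue[i] in letter_dict.keys() and \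
--                 letter_dict[guess_residue[i]] != 0:
--                 miss_list[i] = 1
--                 letter_dict[guess_residue[i]] -= 1
--
--
--     return miss_list
-- ===== SOURCE B (Python) =====
-- def missed_check(guess_residue, correct_residue, miss_list):
--     # Single direct pass: mark every non-'.' position whose letter occurs in
--     # correct_residue; mutates miss_list in place like the original.
--     for i, ch in enumerate(guess_residue):
--         if ch != "." and ch in correct_residue:
--             miss_list[i] = 1
--     return miss_list
-- ===== Notes on version B (the rewrite author's own statement) =====
-- stated objective: simpler
-- what changed: Dropped A's two passes and its letter-frequency dict (whose counts can never run out before the positions they count) for one direct marking pass over enumerate(guess_residue), with no auxiliary table.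
import Mathlib
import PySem

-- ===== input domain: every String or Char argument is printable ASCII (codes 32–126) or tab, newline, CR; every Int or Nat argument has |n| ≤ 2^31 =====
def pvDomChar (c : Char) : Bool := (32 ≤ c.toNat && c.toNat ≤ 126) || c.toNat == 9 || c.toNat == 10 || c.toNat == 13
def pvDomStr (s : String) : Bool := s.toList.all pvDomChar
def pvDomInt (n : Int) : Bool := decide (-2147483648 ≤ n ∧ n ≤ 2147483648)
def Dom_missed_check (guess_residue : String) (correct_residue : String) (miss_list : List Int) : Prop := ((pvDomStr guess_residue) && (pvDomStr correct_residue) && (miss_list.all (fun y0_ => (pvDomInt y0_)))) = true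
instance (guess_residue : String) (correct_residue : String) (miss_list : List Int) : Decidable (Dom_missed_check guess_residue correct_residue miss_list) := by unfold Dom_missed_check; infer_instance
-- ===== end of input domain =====

-- B replaces A's two passes plus letter-frequency dict (which never limits anything)
-- by one direct marking pass; both mutate miss_list in place in Python, equivalence
-- proved here is about the returned value.


-- B replaces A's two passes plus letter-frequency dict (the dict's counts can never run
-- out before the positions they count) by one direct marking pass; both Pythons mutate
-- miss_list in place the same way, the equivalence proved here is about the return value.

-- ===== PORT A =====
-- step of A's first loop body (ch = guess_residue[i])
def mcStep1 (cs : List Char) (d : PySem.Dict Char Int) (ch : Char) : PySem.Dict Char Int :=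
  if PySem.Chars.isIn [ch] cs && ch != '.' then
    if d.contains ch then d.insert ch (d.getD ch 0 + 1)
    else d.insert ch 1
  else d

-- step of A's second loop body (p = (loop index i, guess_residue[i]))
def mcStep2 (cs : List Char) (st : PySem.Dict Char Int × List Int) (p : Int × Char) :
    PySem.Dict Char Int × List Int :=
  if PySem.Chars.isIn [p.2] cs && p.2 != '.' then
    if st.1.contains p.2 && st.1.getD p.2 0 != 0 then
      (st.1.insert p.2 (st.1.getD p.2 0 - 1), PySem.List.pySetD st.2 p.1 1)
    else st
  else st

-- two index loops 'for i in range(len(guess_residue))'; miss_list[i] = 1 is pySetD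
-- (exact inside Pre_, where the index is in range)
def missed_check (guess_residue : String) (correct_residue : String) (miss_list : List Int) : List Int :=
  ((PySem.List.pyRange 0 (PySem.List.len guess_residue.toList) 1).foldl
      (fun st j => mcStep2 correct_residue.toList st (j, PySem.List.pyGetD guess_residue.toList j ' '))
      ((PySem.List.pyRange 0 (PySem.List.len guess_residue.toList) 1).foldl
          (fun d j => mcStep1 correct_residue.toList d (PySem.List.pyGetD guess_residue.toList j ' '))
          PySem.Dict.empty,
        miss_list)).2

-- ===== PORT B =====
def missed_check_alt (guess_residue : String) (correct_residue : String) (miss_list : List Int) : List Int :=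
  (PySem.List.enumerate guess_residue.toList).foldl
    (fun ml p => if p.2 != '.' && PySem.Chars.isIn [p.2] correct_residue.toList then
                   PySem.List.pySetD ml p.1 1
                 else ml)
    miss_list

-- ===== PRECONDITION & SPEC =====
-- Pre_ excludes exactly the inputs where the Python A raises IndexError: some position of
-- guess_residue whose letter occurs in correct_residue and is not '.' lies beyond the end
-- of miss_list. (B raises IndexError there too.)
def Pre_missed_check (guess_residue : String) (correct_residue : String) (miss_list : List Int) : Prop :=
  ∀ i : Nat, (h : i < guess_residue.toList.length) →
    (guess_residue.toList[i] ∈ correct_residue.toList ∧ guess_residue.toList[i] ≠ '.') →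
    i < miss_list.length
instance (guess_residue : String) (correct_residue : String) (miss_list : List Int) : Decidable (Pre_missed_check guess_residue correct_residue miss_list) := by unfold Pre_missed_check; infer_instance

def pvWitness_missed_check : String × String × List Int := ("ab.", "bc", [0, 0, 0])

def Spec_missed_check (guess_residue : String) (correct_residue : String) (miss_list : List Int) (out : List Int) : Prop := out = missed_check_alt guess_residue correct_residue miss_list
instance (guess_residue : String) (correct_residue : String) (miss_list : List Int) (out : List Int) : Decidable (Spec_missed_check guess_residue correct_residue miss_list out) := by unfold Spec_missed_check; infer_instance

-- ===== CLAIM (what is proved, stated in full; the proofs are below) =====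
def Claim_equal_missed_check : Prop := ∀ (guess_residue : String) (correct_residue : String) (miss_list : List Int), Dom_missed_check guess_residue correct_residue miss_list → Pre_missed_check guess_residue correct_residue miss_list → Spec_missed_check guess_residue correct_residue miss_list (missed_check guess_residue correct_residue miss_list)

-- ===== LEMMAS AND PROOFS =====

def mcQual (cs : List Char) (ch : Char) : Bool := PySem.Chars.isIn [ch] cs && ch != '.'

-- B tests the same two conditions in the other order
theorem mcQual_comm (cs : List Char) (ch : Char) :
    (ch != '.' && PySem.Chars.isIn [ch] cs) = mcQual cs ch := by
  unfold mcQual; exact Bool.and_comm _ _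

-- A's first pass counts exactly the qualifying occurrences
theorem mcStep1_getD (cs : List Char) (xs : List Char) (d : PySem.Dict Char Int) (ch : Char) :
    (xs.foldl (mcStep1 cs) d).getD ch 0
      = d.getD ch 0 + ((xs.filter (mcQual cs)).count ch : Int) := by
  induction xs generalizing d with
  | nil => simp
  | cons x t ih =>
    simp only [List.foldl_cons, ih, List.filter_cons]
    by_cases hq : mcQual cs x
    · have hstep : mcStep1 cs d x = d.insert x (d.getD x 0 + 1) := by
        unfold mcStep1
        rw [if_pos (by simpa [mcQual] using hq)]
        by_cases hc : d.contains x
        · rw [if_pos hc]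
        · rw [if_neg (by simp [hc]),
            PySem.Dict.getD_of_not_contains _ _ (by simpa using hc)]
          norm_num
      rw [hstep, if_pos hq, PySem.Dict.getD_insert]
      by_cases hx : ch = x
      · subst hx; simp; ring
      · simp [hx, Ne.symm hx]
    · have hstep : mcStep1 cs d x = d := by
        unfold mcStep1; rw [if_neg (by simpa [mcQual] using hq)]
      rw [hstep, if_neg hq]

-- A's second pass marks every qualifying position, provided the dict holds at least
-- the number of remaining qualifying letters
theorem mcStep2_eq (cs : List Char) (l : List (Int × Char))
    (d : PySem.Dict Char Int) (ml : List Int)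
    (h : ∀ ch, (((l.map Prod.snd).filter (mcQual cs)).count ch : Int) ≤ d.getD ch 0) :
    (l.foldl (mcStep2 cs) (d, ml)).2
      = l.foldl
          (fun ml p => if p.2 != '.' && PySem.Chars.isIn [p.2] cs then
                         PySem.List.pySetD ml p.1 1 else ml) ml := by
  induction l generalizing d ml with
  | nil => rfl
  | cons q t ih =>
    obtain ⟨s, x⟩ := q
    rw [List.foldl_cons, List.foldl_cons]
    by_cases hq : mcQual cs x
    · have hd : ((t.map Prod.snd).filter (mcQual cs)).count x + 1 ≤ d.getD x 0 := by
        have := h x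
        simp only [List.map_cons, List.filter_cons, hq, if_true, List.count_cons_self] at this
        push_cast at this ⊢; omega
      have hpos : 0 < d.getD x 0 := by
        have h0 : (0 : Int) ≤ (((t.map Prod.snd).filter (mcQual cs)).count x : Int) :=
          Int.natCast_nonneg _
        omega
      have hcont : d.contains x = true := by
        rcases hc : d.contains x with _ | _
        · rw [PySem.Dict.getD_of_not_contains _ _ hc] at hpos; omega
        · rfl
      have hA : mcStep2 cs (d, ml) (s, x)
          = (d.insert x (d.getD x 0 - 1), PySem.List.pySetD ml s 1) := by
        unfold mcStep2
        rw [if_pos (by simpa [mcQual] using hq), if_pos (by simp [hcont]; omega)]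
      have hB : (if x != '.' && PySem.Chars.isIn [x] cs then PySem.List.pySetD ml s 1 else ml)
          = PySem.List.pySetD ml s 1 := by
        rw [mcQual_comm, if_pos hq]
      rw [hA, hB]
      apply ih
      intro ch
      rw [PySem.Dict.getD_insert]
      by_cases hx : ch = x
      · subst hx; simp; omega
      · have := h ch
        simp only [List.map_cons, List.filter_cons, hq, if_true, List.count_cons] at this
        simp [Ne.symm hx] at this
        simpa [hx] using this
    · have hA : mcStep2 cs (d, ml) (s, x) = (d, ml) := by
        unfold mcStep2; rw [if_neg (by simpa [mcQual] using hq)]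
      have hB : (if x != '.' && PySem.Chars.isIn [x] cs then PySem.List.pySetD ml s 1 else ml)
          = ml := by
        rw [mcQual_comm, if_neg hq]
      rw [hA, hB]
      apply ih
      intro ch
      have := h ch
      simpa [List.filter_cons, hq] using this

-- 'for j in range(n): … F(st, (j, xs[j])) …' is a fold over the enumerated pairs
theorem mcPairize {σ : Type} (F : σ → (Int × Char) → σ) (gs : List Char) (l : List Int) (init : σ) :
    l.foldl (fun st j => F st (j, PySem.List.pyGetD gs j ' ')) init
      = (l.map (fun j => (j, PySem.List.pyGetD gs j ' '))).foldl F init := by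
  induction l generalizing init with
  | nil => rfl
  | cons x t ih => simp only [List.foldl_cons, List.map_cons, ih]

-- ===== VERDICT (by name: the statement is the Claim_ definition above) =====
theorem missed_check_spec : Claim_equal_missed_check := by
  intro g c ml _ _
  unfold Spec_missed_check missed_check missed_check_alt
  rw [PySem.List.foldl_pyRange_zero_pyGetD g.toList ' ' (mcStep1 c.toList) PySem.Dict.empty,
    PySem.List.enumerate_eq_map_pyRange g.toList ' ',
    mcPairize (mcStep2 c.toList)]
  apply mcStep2_eq
  intro ch
  rw [mcStep1_getD, List.map_map,
    show ((Prod.snd ∘ fun j => (j, PySem.List.pyGetD g.toList j ' '))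
        = fun j => PySem.List.pyGetD g.toList j ' ') from rfl,
    PySem.List.map_pyGetD_pyRange_zero]
  simp
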